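-- pv_equiv track=rewrite | github.com/NotHotmilk/psolver | solvers/practice/CheckRectangle.py | is_rectangle_formed2
-- ===== SOURCE A (Python) =====
-- def is_rectangle_formed2(problem):
--     height = len(problem)
--     width = len(problem[0])
--     visited = [[False for _ in range(width)] for _ in range(height)]
--
--     def dfs(x, y, block):
--         if x < 0 or y < 0 or x >= height or y >= width or visited[x][y] or problem[x][y] == 0:
--             return
--         visited[x][y] = True
--         block.append((x, y))
--
--         dfs(x + 1, y, block)
--         dfs(x - 1, y, block)
--         dfs(x, y + 1, block)
--         dfs(x, y - 1, block)
--
--     def check_rectangle(block):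
--         if not block:
--             return True
--         min_x = min(block, key=lambda x: x[0])[0]
--         max_x = max(block, key=lambda x: x[0])[0]
--         min_y = min(block, key=lambda x: x[1])[1]
--         max_y = max(block, key=lambda x: x[1])[1]
--
--         for x in range(min_x, max_x + 1):
--             for y in range(min_y, max_y + 1):
--                 if (x, y) not in block:
--                     return False
--         return True
--
--     for i in range(height):
--         for j in range(width):
--             if problem[i][j] == 1 and not visited[i][j]:
--                 block = []
--                 dfs(i, j, block)
--                 if not check_rectangle(block):
--                     return False
--     return True
-- ===== SOURCE B (Python) =====
-- def is_rectangle_formed2(problem):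
--     height = len(problem)
--     width = len(problem[0])
--     visited = set()
--
--     for i in range(height):
--         for j in range(width):
--             if problem[i][j] == 1 and (i, j) not in visited:
--                 count = 0
--                 min_x = max_x = i
--                 min_y = max_y = j
--
--                 def dfs(x, y):
--                     nonlocal count, min_x, max_x, min_y, max_y
--                     if x < 0 or y < 0 or x >= height or y >= width \
--                             or (x, y) in visited or problem[x][y] == 0:
--                         return
--                     visited.add((x, y))
--                     count += 1
--                     if x < min_x: min_x = x
--                     if x > max_x: max_x = x
--                     if y < min_y: min_y = y
--                     if y > max_y: max_y = y
--                     dfs(x + 1, y)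
--                     dfs(x - 1, y)
--                     dfs(x, y + 1)
--                     dfs(x, y - 1)
--
--                 dfs(i, j)
--                 if count != (max_x - min_x + 1) * (max_y - min_y + 1):
--                     return False
--     return True
-- ===== Notes on version B (the rewrite author's own statement) =====
-- stated objective: faster
-- what changed: The per-component rectangle test is replaced by a counting argument (a component is a filled rectangle iff its cell count equals its bounding-box area), eliminating A's bounding-box double loop with an O(cells) list-membership test per box cell; visited is a hash set instead of a boolean matrix.
-- outside the precondition, e.g. on is_rectangle_formed2([[1, 1], [1, 0], [0]]): A returns False, B returns False
import Mathlib
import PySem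

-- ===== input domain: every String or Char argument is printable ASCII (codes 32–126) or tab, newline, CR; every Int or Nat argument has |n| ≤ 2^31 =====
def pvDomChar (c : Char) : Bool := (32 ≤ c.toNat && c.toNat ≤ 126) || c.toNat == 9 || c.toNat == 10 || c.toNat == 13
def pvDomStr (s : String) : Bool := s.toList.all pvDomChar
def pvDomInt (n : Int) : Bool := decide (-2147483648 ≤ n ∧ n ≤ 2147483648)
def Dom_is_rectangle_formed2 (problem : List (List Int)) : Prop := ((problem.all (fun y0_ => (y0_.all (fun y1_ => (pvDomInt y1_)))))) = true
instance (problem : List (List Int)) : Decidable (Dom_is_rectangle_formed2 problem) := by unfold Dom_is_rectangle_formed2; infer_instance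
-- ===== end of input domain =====

-- B replaces A's per-component bounding-box membership scan by a counting test
-- (component is a filled rectangle iff cell count = bounding-box area) and uses a
-- set for visited; same DFS order, so both ports share the traversal skeleton.

-- ===== PORT A =====
-- problem[x][y]: exact for the guarded accesses (0 ≤ x < height, 0 ≤ y < width ≤ row length, Pre_)
def pvCell (problem : List (List Int)) (x y : Int) : Int :=
  ((PySem.List.pyGet? problem x).bind (fun r => PySem.List.pyGet? r y)).getD 0

-- visited[x][y] read / write; only used after the guards ensure 0 ≤ x, 0 ≤ y and in-range
def pvVisGet (v : List (List Bool)) (x y : Int) : Bool :=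
  ((PySem.List.pyGet? v x).bind (fun r => PySem.List.pyGet? r y)).getD false

def pvVisSet (v : List (List Bool)) (x y : Int) : List (List Bool) :=
  v.modify x.toNat (fun row => row.set y.toNat true)

-- dfs of A: fuel = height*width+1 frames suffice because every recursing frame
-- first marks a fresh cell visited (a literal port of the recursion otherwise)
def pvDfsA (problem : List (List Int)) (H W : Int) :
    Nat → Int → Int → List (List Bool) × List (Int × Int) → List (List Bool) × List (Int × Int)
  | 0, _, _, s => s
  | fuel + 1, x, y, (v, b) =>
    if x < 0 ∨ y < 0 ∨ x ≥ H ∨ y ≥ W ∨ pvVisGet v x y = true ∨ pvCell problem x y = 0 then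
      (v, b)
    else
      let s1 := (pvVisSet v x y, b ++ [(x, y)])
      let s2 := pvDfsA problem H W fuel (x + 1) y s1
      let s3 := pvDfsA problem H W fuel (x - 1) y s2
      let s4 := pvDfsA problem H W fuel x (y + 1) s3
      pvDfsA problem H W fuel x (y - 1) s4

-- check_rectangle of A (the early-return double loop is the Bool `all` of its body)
def pvCheckRect (block : List (Int × Int)) : Bool :=
  if block.isEmpty then true
  else
    match PySem.List.min? block (fun p => p.1), PySem.List.max? block (fun p => p.1),
          PySem.List.min? block (fun p => p.2), PySem.List.max? block (fun p => p.2) with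
    | some mnx, some mxx, some mny, some mxy =>
        (PySem.List.pyRange mnx.1 (mxx.1 + 1) 1).all fun x =>
          (PySem.List.pyRange mny.2 (mxy.2 + 1) 1).all fun y =>
            decide ((x, y) ∈ block)
    | _, _, _, _ => true

def pvLoopA (problem : List (List Int)) (H W : Int) (fuel : Nat) :
    List (Int × Int) → List (List Bool) → Bool
  | [], _ => true
  | (i, j) :: rest, v =>
    if pvCell problem i j = 1 ∧ pvVisGet v i j = false then
      let s := pvDfsA problem H W fuel i j (v, [])
      if pvCheckRect s.2 then pvLoopA problem H W fuel rest s.1 else false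
    else pvLoopA problem H W fuel rest v

def is_rectangle_formed2 (problem : List (List Int)) : Bool :=
  let H : Int := problem.length
  let W : Int := (problem.headI).length
  let visited := List.replicate H.toNat (List.replicate W.toNat false)
  pvLoopA problem H W (H.toNat * W.toNat + 1)
    ((PySem.List.pyRange 0 H 1).flatMap fun i => (PySem.List.pyRange 0 W 1).map fun j => (i, j))
    visited

-- ===== PORT B =====
-- the five nonlocal updates of B's dfs (count, min_x, max_x, min_y, max_y)
def pvStep (s : Int × Int × Int × Int × Int) (p : Int × Int) : Int × Int × Int × Int × Int :=
  match s, p with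
  | (cnt, mnx, mxx, mny, mxy), (x, y) =>
    (cnt + 1, if x < mnx then x else mnx, if x > mxx then x else mxx,
     if y < mny then y else mny, if y > mxy then y else mxy)

def pvDfsB (problem : List (List Int)) (H W : Int) :
    Nat → Int → Int → PySem.Set (Int × Int) × (Int × Int × Int × Int × Int) →
      PySem.Set (Int × Int) × (Int × Int × Int × Int × Int)
  | 0, _, _, s => s
  | fuel + 1, x, y, (vis, st) =>
    if x < 0 ∨ y < 0 ∨ x ≥ H ∨ y ≥ W ∨ (x, y) ∈ vis ∨ pvCell problem x y = 0 then
      (vis, st)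
    else
      let s1 := (PySem.Set.add vis (x, y), pvStep st (x, y))
      let s2 := pvDfsB problem H W fuel (x + 1) y s1
      let s3 := pvDfsB problem H W fuel (x - 1) y s2
      let s4 := pvDfsB problem H W fuel x (y + 1) s3
      pvDfsB problem H W fuel x (y - 1) s4

def pvLoopB (problem : List (List Int)) (H W : Int) (fuel : Nat) :
    List (Int × Int) → PySem.Set (Int × Int) → Bool
  | [], _ => true
  | (i, j) :: rest, vis =>
    if pvCell problem i j = 1 ∧ (i, j) ∉ vis then
      let s := pvDfsB problem H W fuel i j (vis, (0, i, i, j, j))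
      match s.2 with
      | (cnt, mnx, mxx, mny, mxy) =>
        if cnt ≠ (mxx - mnx + 1) * (mxy - mny + 1) then false
        else pvLoopB problem H W fuel rest s.1
    else pvLoopB problem H W fuel rest vis

def is_rectangle_formed2_alt (problem : List (List Int)) : Bool :=
  let H : Int := problem.length
  let W : Int := (problem.headI).length
  pvLoopB problem H W (H.toNat * W.toNat + 1)
    ((PySem.List.pyRange 0 H 1).flatMap fun i => (PySem.List.pyRange 0 W 1).map fun j => (i, j))
    (PySem.Set.ofList [])

-- ===== PRECONDITION & SPEC =====
-- Pre_ excludes the empty grid and ragged grids having a row shorter than the first row: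
-- there A's problem[x][y] indexing in general raises IndexError (on the rare ragged grids
-- where an early False return precedes the bad access, both programs agree anyway).
def Pre_is_rectangle_formed2 (problem : List (List Int)) : Prop :=
  problem.isEmpty = false ∧
    problem.all (fun row => decide ((problem.headI).length ≤ row.length)) = true
instance (problem : List (List Int)) : Decidable (Pre_is_rectangle_formed2 problem) := by
  unfold Pre_is_rectangle_formed2; infer_instance

def pvWitness_is_rectangle_formed2 : List (List Int) := [[1, 1, 0], [1, 1, 0]]

def Spec_is_rectangle_formed2 (problem : List (List Int)) (out : Bool) : Prop := out = is_rectangle_formed2_alt problem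
instance (problem : List (List Int)) (out : Bool) : Decidable (Spec_is_rectangle_formed2 problem out) := by unfold Spec_is_rectangle_formed2; infer_instance

-- ===== CLAIM (what is proved, stated in full; the proofs are below) =====
def Claim_equal_is_rectangle_formed2 : Prop := ∀ (problem : List (List Int)), Dom_is_rectangle_formed2 problem → Pre_is_rectangle_formed2 problem → Spec_is_rectangle_formed2 problem (is_rectangle_formed2 problem)


-- ===== LEMMAS AND PROOFS =====

def pvShape (H W : Int) (v : List (List Bool)) : Prop :=
  v.length = H.toNat ∧ ∀ row ∈ v, row.length = W.toNat

def pvRel (H W : Int) (v : List (List Bool)) (vis : PySem.Set (Int × Int)) : Prop :=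
  ∀ x y : Int, 0 ≤ x → x < H → 0 ≤ y → y < W →
    (pvVisGet v x y = true ↔ (x, y) ∈ vis)

theorem pvVisGet_def {v : List (List Bool)} {x y : Int} (hx0 : 0 ≤ x) (hy0 : 0 ≤ y)
    (hx : x.toNat < v.length) (hy : y.toNat < (v[x.toNat]).length) :
    pvVisGet v x y = v[x.toNat][y.toNat] := by
  unfold pvVisGet
  rw [PySem.List.pyGet?_of_nonneg v hx0, List.getElem?_eq_getElem hx]
  show (PySem.List.pyGet? v[x.toNat] y).getD false = _
  rw [PySem.List.pyGet?_of_nonneg _ hy0, List.getElem?_eq_getElem hy]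
  rfl

theorem pvShape_set {H W : Int} {v : List (List Bool)} (hs : pvShape H W v) (x y : Int) :
    pvShape H W (pvVisSet v x y) := by
  obtain ⟨h1, h2⟩ := hs
  constructor
  · simpa [pvVisSet] using h1
  · intro row hrow
    rw [pvVisSet, List.mem_iff_getElem] at hrow
    obtain ⟨k, hk, hrow⟩ := hrow
    rw [List.getElem_modify] at hrow
    by_cases hkx : x.toNat = k
    · rw [if_pos hkx] at hrow
      rw [← hrow, List.length_set]
      exact h2 _ (List.getElem_mem _)
    · rw [if_neg hkx] at hrow
      rw [← hrow]
      exact h2 _ (List.getElem_mem _)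

theorem pvVisGet_set {H W : Int} {v : List (List Bool)} (hs : pvShape H W v)
    {x y x' y' : Int} (hx0 : 0 ≤ x) (hxH : x < H) (hy0 : 0 ≤ y) (hyW : y < W)
    (hx'0 : 0 ≤ x') (hx'H : x' < H) (hy'0 : 0 ≤ y') (hy'W : y' < W) :
    pvVisGet (pvVisSet v x y) x' y' =
      if x' = x ∧ y' = y then true else pvVisGet v x' y' := by
  obtain ⟨h1, h2⟩ := hs
  have hH0 : 0 < H := lt_of_le_of_lt hx0 hxH
  have hx'l : x'.toNat < v.length := by omega
  have hxl : x.toNat < v.length := by omega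
  have hy'l : y'.toNat < (v[x'.toNat]).length := by
    have := h2 _ (List.getElem_mem hx'l); omega
  have hyl : y.toNat < (v[x.toNat]).length := by
    have := h2 _ (List.getElem_mem hxl); omega
  have hm : (pvVisSet v x y).length = v.length := by simp [pvVisSet]
  have hx'm : x'.toNat < (pvVisSet v x y).length := by omega
  have hy'm : y'.toNat < ((pvVisSet v x y)[x'.toNat]'hx'm).length := by
    have he : ((pvVisSet v x y)[x'.toNat]'hx'm).length = (v[x'.toNat]'hx'l).length := by
      simp only [pvVisSet, List.getElem_modify]
      split
      · rw [List.length_set]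
      · rfl
    omega
  rw [pvVisGet_def hx'0 hy'0 hx'm hy'm, pvVisGet_def hx'0 hy'0 hx'l hy'l]
  simp only [pvVisSet, List.getElem_modify]
  split
  · rename_i hxx
    have hxe : x' = x := by omega
    rw [List.getElem_set]
    by_cases hyy : y.toNat = y'.toNat
    · have hye : y' = y := by omega
      simp [hxe, hye]
    · have hne : ¬(x' = x ∧ y' = y) := by
        rintro ⟨_, rfl⟩; omega
      simp [hyy, hne]
  · rename_i hxx
    have hne : ¬(x' = x ∧ y' = y) := by
      rintro ⟨rfl, _⟩; omega
    rw [if_neg hne]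

theorem pvMemAdd {α : Type} [BEq α] [LawfulBEq α] (s : PySem.Set α) (q p : α) :
    p ∈ PySem.Set.add s q ↔ p = q ∨ p ∈ s := by
  unfold PySem.Set.add PySem.Set.contains
  split
  · rename_i h
    simp only [List.contains_iff_mem] at h
    constructor
    · exact Or.inr
    · rintro (rfl | h2)
      · exact h
      · exact h2
  · simp [or_comm]

theorem pvLockstep (problem : List (List Int)) (H W : Int) :
    ∀ (fuel : Nat) (x y : Int) (v : List (List Bool)) (vis : PySem.Set (Int × Int)),
    pvShape H W v → pvRel H W v vis →
    ∃ v₂ vis₂ Δ,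
      (∀ b, pvDfsA problem H W fuel x y (v, b) = (v₂, b ++ Δ)) ∧
      (∀ st, pvDfsB problem H W fuel x y (vis, st) = (vis₂, Δ.foldl pvStep st)) ∧
      pvShape H W v₂ ∧ pvRel H W v₂ vis₂ ∧
      Δ.Nodup ∧ (∀ p ∈ Δ, p ∉ vis) ∧ (∀ p, p ∈ vis₂ ↔ p ∈ vis ∨ p ∈ Δ) ∧
      (fuel ≠ 0 → 0 ≤ x → x < H → 0 ≤ y → y < W → (x, y) ∉ vis →
        pvCell problem x y ≠ 0 → ∃ Δ', Δ = (x, y) :: Δ') := by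
  intro fuel
  induction fuel with
  | zero =>
    intro x y v vis hs hr
    exact ⟨v, vis, [], fun b => by simp [pvDfsA], fun st => rfl, hs, hr, List.nodup_nil,
      by simp, fun p => by simp, fun h => absurd rfl h⟩
  | succ fuel ih =>
    intro x y v vis hs hr
    by_cases hrange : x < 0 ∨ y < 0 ∨ x ≥ H ∨ y ≥ W
    · have gA : (x < 0 ∨ y < 0 ∨ x ≥ H ∨ y ≥ W ∨ pvVisGet v x y = true ∨
          pvCell problem x y = 0) := by tauto
      have gB : (x < 0 ∨ y < 0 ∨ x ≥ H ∨ y ≥ W ∨ (x, y) ∈ vis ∨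
          pvCell problem x y = 0) := by tauto
      refine ⟨v, vis, [], ?_, ?_, hs, hr, List.nodup_nil, by simp, fun p => by simp, ?_⟩
      · intro b; simp only [pvDfsA]; rw [if_pos gA]; simp
      · intro st; simp only [pvDfsB]; rw [if_pos gB]; rfl
      · intro _ h1 h2 h3 h4 _ _
        exfalso; rcases hrange with h | h | h | h <;> omega
    · push_neg at hrange
      obtain ⟨hx0, hy0, hxH, hyW⟩ := hrange
      have hvis := hr x y hx0 hxH hy0 hyW
      by_cases hstop : pvVisGet v x y = true ∨ pvCell problem x y = 0
      · have gA : (x < 0 ∨ y < 0 ∨ x ≥ H ∨ y ≥ W ∨ pvVisGet v x y = true ∨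
            pvCell problem x y = 0) := Or.inr (Or.inr (Or.inr (Or.inr hstop)))
        have gB : (x < 0 ∨ y < 0 ∨ x ≥ H ∨ y ≥ W ∨ (x, y) ∈ vis ∨
            pvCell problem x y = 0) := by
          rcases hstop with h | h
          · exact Or.inr (Or.inr (Or.inr (Or.inr (Or.inl (hvis.mp h)))))
          · exact Or.inr (Or.inr (Or.inr (Or.inr (Or.inr h))))
        refine ⟨v, vis, [], ?_, ?_, hs, hr, List.nodup_nil, by simp, fun p => by simp, ?_⟩
        · intro b; simp only [pvDfsA]; rw [if_pos gA]; simp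
        · intro st; simp only [pvDfsB]; rw [if_pos gB]; rfl
        · intro _ _ _ _ _ hnv hnc
          rcases hstop with h | h
          · exact absurd (hvis.mp h) hnv
          · exact absurd h hnc
      · push_neg at hstop
        obtain ⟨hnvg, hnc⟩ := hstop
        have hnv : (x, y) ∉ vis := fun h => hnvg (hvis.mpr h)
        have gA : ¬(x < 0 ∨ y < 0 ∨ x ≥ H ∨ y ≥ W ∨ pvVisGet v x y = true ∨
            pvCell problem x y = 0) := by
          push_neg
          exact ⟨by omega, by omega, by omega, by omega, hnvg, hnc⟩
        have gB : ¬(x < 0 ∨ y < 0 ∨ x ≥ H ∨ y ≥ W ∨ (x, y) ∈ vis ∨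
            pvCell problem x y = 0) := by
          push_neg
          exact ⟨by omega, by omega, by omega, by omega, hnv, hnc⟩
        have hs1 : pvShape H W (pvVisSet v x y) := pvShape_set hs x y
        have hr1 : pvRel H W (pvVisSet v x y) (PySem.Set.add vis (x, y)) := by
          intro a b ha1 ha2 hb1 hb2
          rw [pvVisGet_set hs hx0 hxH hy0 hyW ha1 ha2 hb1 hb2, pvMemAdd]
          by_cases h : a = x ∧ b = y
          · simp [h.1, h.2]
          · rw [if_neg h, hr a b ha1 ha2 hb1 hb2]
            have hne : ¬((a, b) = (x, y)) := by
              intro he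
              exact h ⟨congrArg Prod.fst he, congrArg Prod.snd he⟩
            simp [hne]
        obtain ⟨v1, s1, Δ1, hA1, hB1, hs1', hr1', hnd1, hf1, hm1, -⟩ :=
          ih (x + 1) y (pvVisSet v x y) (PySem.Set.add vis (x, y)) hs1 hr1
        obtain ⟨v2, s2, Δ2, hA2, hB2, hs2', hr2', hnd2, hf2, hm2, -⟩ :=
          ih (x - 1) y v1 s1 hs1' hr1'
        obtain ⟨v3, s3, Δ3, hA3, hB3, hs3', hr3', hnd3, hf3, hm3, -⟩ :=
          ih x (y + 1) v2 s2 hs2' hr2'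
        obtain ⟨v4, s4, Δ4, hA4, hB4, hs4', hr4', hnd4, hf4, hm4, -⟩ :=
          ih x (y - 1) v3 s3 hs3' hr3'
        have hps1 : ∀ p, p ∈ s1 ↔ (p ∈ vis ∨ p = (x, y)) ∨ p ∈ Δ1 := by
          intro p; rw [hm1 p, pvMemAdd]; tauto
        have hps2 : ∀ p, p ∈ s2 ↔ ((p ∈ vis ∨ p = (x, y)) ∨ p ∈ Δ1) ∨ p ∈ Δ2 := by
          intro p; rw [hm2 p, hps1 p]
        have hps3 : ∀ p, p ∈ s3 ↔ (((p ∈ vis ∨ p = (x, y)) ∨ p ∈ Δ1) ∨ p ∈ Δ2) ∨ p ∈ Δ3 := by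
          intro p; rw [hm3 p, hps2 p]
        have hxy1 : (x, y) ∈ s1 := (hps1 _).mpr (Or.inl (Or.inr rfl))
        refine ⟨v4, s4, (x, y) :: (Δ1 ++ (Δ2 ++ (Δ3 ++ Δ4))), ?_, ?_, hs4', hr4', ?_, ?_, ?_, ?_⟩
        · intro b
          simp only [pvDfsA]
          rw [if_neg gA]
          show pvDfsA problem H W fuel x (y - 1)
              (pvDfsA problem H W fuel x (y + 1)
                (pvDfsA problem H W fuel (x - 1) y
                  (pvDfsA problem H W fuel (x + 1) y (pvVisSet v x y, b ++ [(x, y)])))) = _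
          rw [hA1 (b ++ [(x, y)]), hA2 _, hA3 _, hA4 _]
          simp [List.append_assoc]
        · intro st
          simp only [pvDfsB]
          rw [if_neg gB]
          show pvDfsB problem H W fuel x (y - 1)
              (pvDfsB problem H W fuel x (y + 1)
                (pvDfsB problem H W fuel (x - 1) y
                  (pvDfsB problem H W fuel (x + 1) y
                    (PySem.Set.add vis (x, y), pvStep st (x, y))))) = _
          rw [hB1 _, hB2 _, hB3 _, hB4 _]
          simp [List.foldl_append]
        · rw [List.nodup_cons]
          constructor
          · intro hmem
            rcases List.mem_append.mp hmem with h1 | h234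
            · exact hf1 _ h1 ((pvMemAdd vis (x, y) (x, y)).mpr (Or.inl rfl))
            · rcases List.mem_append.mp h234 with h2 | h34
              · exact hf2 _ h2 hxy1
              · rcases List.mem_append.mp h34 with h3 | h4
                · exact hf3 _ h3 ((hm2 _).mpr (Or.inl hxy1))
                · exact hf4 _ h4 ((hm3 _).mpr (Or.inl ((hm2 _).mpr (Or.inl hxy1))))
          · refine hnd1.append (hnd2.append (hnd3.append hnd4 ?_) ?_) ?_
            · intro p h3 h4
              exact hf4 _ h4 ((hm3 _).mpr (Or.inr h3))
            · intro p h2 h34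
              rcases List.mem_append.mp h34 with h3 | h4
              · exact hf3 _ h3 ((hm2 _).mpr (Or.inr h2))
              · exact hf4 _ h4 ((hm3 _).mpr (Or.inl ((hm2 _).mpr (Or.inr h2))))
            · intro p h1 h234
              have hp1 : p ∈ s1 := (hm1 _).mpr (Or.inr h1)
              rcases List.mem_append.mp h234 with h2 | h34
              · exact hf2 _ h2 hp1
              · rcases List.mem_append.mp h34 with h3 | h4
                · exact hf3 _ h3 ((hm2 _).mpr (Or.inl hp1))
                · exact hf4 _ h4 ((hm3 _).mpr (Or.inl ((hm2 _).mpr (Or.inl hp1))))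
        · intro p hp
          rcases List.mem_cons.mp hp with rfl | hp'
          · exact hnv
          · intro hpv
            have hp1 : p ∈ s1 := (hps1 _).mpr (Or.inl (Or.inl hpv))
            rcases List.mem_append.mp hp' with h1 | h234
            · exact hf1 _ h1 ((pvMemAdd vis (x, y) p).mpr (Or.inr hpv))
            · rcases List.mem_append.mp h234 with h2 | h34
              · exact hf2 _ h2 hp1
              · rcases List.mem_append.mp h34 with h3 | h4
                · exact hf3 _ h3 ((hm2 _).mpr (Or.inl hp1))
                · exact hf4 _ h4 ((hm3 _).mpr (Or.inl ((hm2 _).mpr (Or.inl hp1))))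
        · intro p
          rw [hm4 p, hps3 p]
          simp only [List.mem_cons, List.mem_append]
          tauto
        · intro _ _ _ _ _ _ _
          exact ⟨_, rfl⟩

def pvMinF (l : List Int) (m : Int) : Int := l.foldl (fun a x => if x < a then x else a) m
def pvMaxF (l : List Int) (m : Int) : Int := l.foldl (fun a x => if x > a then x else a) m

theorem pvFold_eq (Δ : List (Int × Int)) : ∀ (cnt mnx mxx mny mxy : Int),
    Δ.foldl pvStep (cnt, mnx, mxx, mny, mxy) =
      (cnt + Δ.length, pvMinF (Δ.map (fun p => p.1)) mnx, pvMaxF (Δ.map (fun p => p.1)) mxx,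
       pvMinF (Δ.map (fun p => p.2)) mny, pvMaxF (Δ.map (fun p => p.2)) mxy) := by
  induction Δ with
  | nil => intro cnt mnx mxx mny mxy; simp [pvMinF, pvMaxF]
  | cons p Δ ih =>
    obtain ⟨x, y⟩ := p
    intro cnt mnx mxx mny mxy
    simp only [List.foldl_cons, List.map_cons, List.length_cons]
    rw [show pvStep (cnt, mnx, mxx, mny, mxy) (x, y) =
        (cnt + 1, if x < mnx then x else mnx, if x > mxx then x else mxx,
         if y < mny then y else mny, if y > mxy then y else mxy) from rfl]
    rw [ih]
    simp only [pvMinF, pvMaxF, List.foldl_cons]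
    congr 1
    push_cast
    ring

theorem pvMinF_le (l : List Int) : ∀ m, pvMinF l m ≤ m ∧ ∀ x ∈ l, pvMinF l m ≤ x := by
  induction l with
  | nil => intro m; simp [pvMinF]
  | cons a l ih =>
    intro m
    simp only [pvMinF, List.foldl_cons] at *
    obtain ⟨h1, h2⟩ := ih (if a < m then a else m)
    have hm : (if a < m then a else m) ≤ m := by split <;> omega
    have ha : (if a < m then a else m) ≤ a := by split <;> omega
    refine ⟨by omega, ?_⟩
    intro x hx
    rcases List.mem_cons.mp hx with rfl | hx
    · omega
    · exact h2 x hx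

theorem pvMaxF_le (l : List Int) : ∀ m, m ≤ pvMaxF l m ∧ ∀ x ∈ l, x ≤ pvMaxF l m := by
  induction l with
  | nil => intro m; simp [pvMaxF]
  | cons a l ih =>
    intro m
    simp only [pvMaxF, List.foldl_cons] at *
    obtain ⟨h1, h2⟩ := ih (if a > m then a else m)
    have hm : m ≤ (if a > m then a else m) := by split <;> omega
    have ha : a ≤ (if a > m then a else m) := by split <;> omega
    refine ⟨by omega, ?_⟩
    intro x hx
    rcases List.mem_cons.mp hx with rfl | hx
    · omega
    · exact h2 x hx

theorem pvMinF_mem (l : List Int) : ∀ m, pvMinF l m = m ∨ pvMinF l m ∈ l := by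
  induction l with
  | nil => intro m; simp [pvMinF]
  | cons a l ih =>
    intro m
    simp only [pvMinF, List.foldl_cons] at *
    rcases ih (if a < m then a else m) with h | h
    · rw [h]
      split
      · exact Or.inr (by simp)
      · exact Or.inl rfl
    · exact Or.inr (List.mem_cons_of_mem _ h)

theorem pvMaxF_mem (l : List Int) : ∀ m, pvMaxF l m = m ∨ pvMaxF l m ∈ l := by
  induction l with
  | nil => intro m; simp [pvMaxF]
  | cons a l ih =>
    intro m
    simp only [pvMaxF, List.foldl_cons] at *
    rcases ih (if a > m then a else m) with h | h
    · rw [h]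
      split
      · exact Or.inr (by simp)
      · exact Or.inl rfl
    · exact Or.inr (List.mem_cons_of_mem _ h)

theorem pvMin?_key (xs : List (Int × Int)) (key : (Int × Int) → Int) (m : Int × Int)
    (hm : PySem.List.min? xs key = some m)
    (v : Int) (hle : ∀ x ∈ xs, v ≤ key x) (hv : v ∈ xs.map key) : key m = v := by
  obtain ⟨x, hx, hxv⟩ := List.mem_map.mp hv
  have h1 := PySem.List.min?_isMin hm x hx
  have h2 := hle m (PySem.List.min?_mem hm)
  omega

theorem pvMax?_key (xs : List (Int × Int)) (key : (Int × Int) → Int) (m : Int × Int)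
    (hm : PySem.List.max? xs key = some m)
    (v : Int) (hle : ∀ x ∈ xs, key x ≤ v) (hv : v ∈ xs.map key) : key m = v := by
  obtain ⟨x, hx, hxv⟩ := List.mem_map.mp hv
  have h1 := PySem.List.max?_isMax hm x hx
  have h2 := hle m (PySem.List.max?_mem hm)
  omega

theorem pvCount (Δ : List (Int × Int)) (hnd : Δ.Nodup) (mnx mxx mny mxy : Int)
    (hb : ∀ p ∈ Δ, mnx ≤ p.1 ∧ p.1 ≤ mxx ∧ mny ≤ p.2 ∧ p.2 ≤ mxy)
    (hx : mnx ≤ mxx) (hy : mny ≤ mxy) :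
    ((∀ p : Int × Int, mnx ≤ p.1 → p.1 ≤ mxx → mny ≤ p.2 → p.2 ≤ mxy → p ∈ Δ) ↔
      (Δ.length : Int) = (mxx - mnx + 1) * (mxy - mny + 1)) := by
  have hsub : Δ.toFinset ⊆ Finset.Icc mnx mxx ×ˢ Finset.Icc mny mxy := by
    intro p hp
    have := hb p (List.mem_toFinset.mp hp)
    simp only [Finset.mem_product, Finset.mem_Icc]
    omega
  have hcardS : ((Finset.Icc mnx mxx ×ˢ Finset.Icc mny mxy).card : Int) =
      (mxx - mnx + 1) * (mxy - mny + 1) := by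
    rw [Finset.card_product, Int.card_Icc, Int.card_Icc]
    push_cast [Int.toNat_of_nonneg (by omega : (0:Int) ≤ mxx + 1 - mnx),
      Int.toNat_of_nonneg (by omega : (0:Int) ≤ mxy + 1 - mny)]
    ring
  have hlen : Δ.toFinset.card = Δ.length := List.toFinset_card_of_nodup hnd
  constructor
  · intro h
    have hsup : Finset.Icc mnx mxx ×ˢ Finset.Icc mny mxy ⊆ Δ.toFinset := by
      intro p hp
      simp only [Finset.mem_product, Finset.mem_Icc] at hp
      exact List.mem_toFinset.mpr (h p hp.1.1 hp.1.2 hp.2.1 hp.2.2)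
    have heq : Δ.toFinset = Finset.Icc mnx mxx ×ˢ Finset.Icc mny mxy :=
      Finset.Subset.antisymm hsub hsup
    rw [← hlen, heq, hcardS]
  · intro h
    have hcard : (Finset.Icc mnx mxx ×ˢ Finset.Icc mny mxy).card ≤ Δ.toFinset.card := by
      omega
    have heq := Finset.eq_of_subset_of_card_le hsub hcard
    intro p h1 h2 h3 h4
    have : p ∈ Finset.Icc mnx mxx ×ˢ Finset.Icc mny mxy := by
      simp only [Finset.mem_product, Finset.mem_Icc]
      omega
    rw [← heq] at this
    exact List.mem_toFinset.mp this

theorem pvCheck_eq_count (i j : Int) (Δ' : List (Int × Int)) (hnd : ((i, j) :: Δ').Nodup)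
    (cnt mnx mxx mny mxy : Int)
    (hfold : ((i, j) :: Δ').foldl pvStep (0, i, i, j, j) = (cnt, mnx, mxx, mny, mxy)) :
    pvCheckRect ((i, j) :: Δ') = decide (cnt = (mxx - mnx + 1) * (mxy - mny + 1)) := by
  rw [pvFold_eq] at hfold
  simp only [Prod.mk.injEq] at hfold
  obtain ⟨hcnt, hmnx, hmxx, hmny, hmxy⟩ := hfold
  have hii : i ∈ (((i, j) :: Δ').map (fun p => p.1)) := by simp
  have hjj : j ∈ (((i, j) :: Δ').map (fun p => p.2)) := by simp
  have hmnx_le : ∀ p ∈ (i, j) :: Δ', mnx ≤ p.1 := by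
    intro p hp
    rw [← hmnx]
    exact (pvMinF_le _ i).2 _ (List.mem_map.mpr ⟨p, hp, rfl⟩)
  have hmxx_le : ∀ p ∈ (i, j) :: Δ', p.1 ≤ mxx := by
    intro p hp
    rw [← hmxx]
    exact (pvMaxF_le _ i).2 _ (List.mem_map.mpr ⟨p, hp, rfl⟩)
  have hmny_le : ∀ p ∈ (i, j) :: Δ', mny ≤ p.2 := by
    intro p hp
    rw [← hmny]
    exact (pvMinF_le _ j).2 _ (List.mem_map.mpr ⟨p, hp, rfl⟩)
  have hmxy_le : ∀ p ∈ (i, j) :: Δ', p.2 ≤ mxy := by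
    intro p hp
    rw [← hmxy]
    exact (pvMaxF_le _ j).2 _ (List.mem_map.mpr ⟨p, hp, rfl⟩)
  have hmnx_mem : mnx ∈ (((i, j) :: Δ').map (fun p => p.1)) := by
    rcases pvMinF_mem (((i, j) :: Δ').map (fun p => p.1)) i with h | h
    · rw [← hmnx, h]; exact hii
    · rw [← hmnx]; exact h
  have hmxx_mem : mxx ∈ (((i, j) :: Δ').map (fun p => p.1)) := by
    rcases pvMaxF_mem (((i, j) :: Δ').map (fun p => p.1)) i with h | h
    · rw [← hmxx, h]; exact hii
    · rw [← hmxx]; exact h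
  have hmny_mem : mny ∈ (((i, j) :: Δ').map (fun p => p.2)) := by
    rcases pvMinF_mem (((i, j) :: Δ').map (fun p => p.2)) j with h | h
    · rw [← hmny, h]; exact hjj
    · rw [← hmny]; exact h
  have hmxy_mem : mxy ∈ (((i, j) :: Δ').map (fun p => p.2)) := by
    rcases pvMaxF_mem (((i, j) :: Δ').map (fun p => p.2)) j with h | h
    · rw [← hmxy, h]; exact hjj
    · rw [← hmxy]; exact h
  have hxle : mnx ≤ mxx :=
    le_trans (hmnx_le (i, j) (by simp)) (hmxx_le (i, j) (by simp))
  have hyle : mny ≤ mxy :=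
    le_trans (hmny_le (i, j) (by simp)) (hmxy_le (i, j) (by simp))
  cases hma : PySem.List.min? ((i, j) :: Δ') (fun p => p.1) with
  | none => rw [PySem.List.min?_eq_none_iff] at hma; exact absurd hma (by simp)
  | some a =>
  cases hmb : PySem.List.max? ((i, j) :: Δ') (fun p => p.1) with
  | none => rw [PySem.List.max?_eq_none_iff] at hmb; exact absurd hmb (by simp)
  | some b =>
  cases hmc : PySem.List.min? ((i, j) :: Δ') (fun p => p.2) with
  | none => rw [PySem.List.min?_eq_none_iff] at hmc; exact absurd hmc (by simp)
  | some c =>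
  cases hmd : PySem.List.max? ((i, j) :: Δ') (fun p => p.2) with
  | none => rw [PySem.List.max?_eq_none_iff] at hmd; exact absurd hmd (by simp)
  | some d =>
  have ha1 : a.1 = mnx := pvMin?_key _ _ _ hma mnx hmnx_le hmnx_mem
  have hb1 : b.1 = mxx := pvMax?_key _ _ _ hmb mxx hmxx_le hmxx_mem
  have hc2 : c.2 = mny := pvMin?_key _ _ _ hmc mny hmny_le hmny_mem
  have hd2 : d.2 = mxy := pvMax?_key _ _ _ hmd mxy hmxy_le hmxy_mem
  rw [show pvCheckRect ((i, j) :: Δ') =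
      (if ((i, j) :: Δ').isEmpty then true
       else
        match PySem.List.min? ((i, j) :: Δ') (fun p => p.1),
              PySem.List.max? ((i, j) :: Δ') (fun p => p.1),
              PySem.List.min? ((i, j) :: Δ') (fun p => p.2),
              PySem.List.max? ((i, j) :: Δ') (fun p => p.2) with
        | some mnx, some mxx, some mny, some mxy =>
            (PySem.List.pyRange mnx.1 (mxx.1 + 1) 1).all fun x =>
              (PySem.List.pyRange mny.2 (mxy.2 + 1) 1).all fun y =>
                decide ((x, y) ∈ (i, j) :: Δ')
        | _, _, _, _ => true) from rfl]
  rw [hma, hmb, hmc, hmd]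
  simp only [List.isEmpty_cons, Bool.false_eq_true, if_false]
  rw [ha1, hb1, hc2, hd2]
  rw [Bool.eq_iff_iff]
  rw [List.all_eq_true, decide_eq_true_eq]
  constructor
  · intro h
    rw [← hcnt, zero_add]
    rw [← pvCount ((i, j) :: Δ') hnd mnx mxx mny mxy
      (fun p hp => ⟨hmnx_le p hp, hmxx_le p hp, hmny_le p hp, hmxy_le p hp⟩) hxle hyle]
    intro p h1 h2 h3 h4
    have hx := h p.1 (PySem.List.mem_pyRange_one.mpr ⟨h1, by omega⟩)
    rw [List.all_eq_true] at hx
    have hy := hx p.2 (PySem.List.mem_pyRange_one.mpr ⟨h3, by omega⟩)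
    rw [decide_eq_true_eq] at hy
    exact (by simpa using hy : p ∈ (i, j) :: Δ')
  · intro h
    have hlen : ((((i,j)::Δ').length : Nat) : Int) = (mxx - mnx + 1) * (mxy - mny + 1) := by
      rw [← h, ← hcnt, zero_add]
    have hall := (pvCount ((i, j) :: Δ') hnd mnx mxx mny mxy
      (fun p hp => ⟨hmnx_le p hp, hmxx_le p hp, hmny_le p hp, hmxy_le p hp⟩) hxle hyle).mpr hlen
    intro x hxmem
    rw [List.all_eq_true]
    intro y hymem
    rw [decide_eq_true_eq]
    obtain ⟨hx1, hx2⟩ := PySem.List.mem_pyRange_one.mp hxmem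
    obtain ⟨hy1, hy2⟩ := PySem.List.mem_pyRange_one.mp hymem
    exact hall (x, y) hx1 (by omega) hy1 (by omega)

theorem pvLoop_lockstep (problem : List (List Int)) (H W : Int) (fuel : Nat) (hf : fuel ≠ 0) :
    ∀ (idx : List (Int × Int)) (v : List (List Bool)) (vis : PySem.Set (Int × Int)),
    pvShape H W v → pvRel H W v vis →
    (∀ p ∈ idx, 0 ≤ p.1 ∧ p.1 < H ∧ 0 ≤ p.2 ∧ p.2 < W) →
    pvLoopA problem H W fuel idx v = pvLoopB problem H W fuel idx vis := by
  intro idx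
  induction idx with
  | nil => intro v vis _ _ _; rfl
  | cons p rest ihr =>
    obtain ⟨i, j⟩ := p
    intro v vis hs hr hb
    obtain ⟨hi0, hiH, hj0, hjW⟩ := hb (i, j) List.mem_cons_self
    have hrest : ∀ q ∈ rest, 0 ≤ q.1 ∧ q.1 < H ∧ 0 ≤ q.2 ∧ q.2 < W :=
      fun q hq => hb q (List.mem_cons_of_mem _ hq)
    have hcond := hr i j hi0 hiH hj0 hjW
    by_cases hc : pvCell problem i j = 1 ∧ pvVisGet v i j = false
    · have hcB : pvCell problem i j = 1 ∧ (i, j) ∉ vis := by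
        refine ⟨hc.1, fun h => ?_⟩
        rw [hcond.mpr h] at hc
        exact Bool.true_eq_false ▸ hc.2
      obtain ⟨v₂, vis₂, Δ, hA, hB, hs₂, hr₂, hnd, hfr, hmem, hhead⟩ :=
        pvLockstep problem H W fuel i j v vis hs hr
      obtain ⟨Δ', rfl⟩ := hhead hf hi0 hiH hj0 hjW hcB.2 (by rw [hc.1]; decide)
      simp only [pvLoopA, pvLoopB]
      rw [if_pos hc, if_pos hcB]
      show (if pvCheckRect (pvDfsA problem H W fuel i j (v, [])).2 then
          pvLoopA problem H W fuel rest (pvDfsA problem H W fuel i j (v, [])).1 else false) =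
        (if (pvDfsB problem H W fuel i j (vis, (0, i, i, j, j))).2.1 ≠
              ((pvDfsB problem H W fuel i j (vis, (0, i, i, j, j))).2.2.2.1 -
                  (pvDfsB problem H W fuel i j (vis, (0, i, i, j, j))).2.2.1 + 1) *
                ((pvDfsB problem H W fuel i j (vis, (0, i, i, j, j))).2.2.2.2.2 -
                  (pvDfsB problem H W fuel i j (vis, (0, i, i, j, j))).2.2.2.2.1 + 1) then false
          else pvLoopB problem H W fuel rest (pvDfsB problem H W fuel i j (vis, (0, i, i, j, j))).1)
      rw [hA [], hB (0, i, i, j, j)]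
      rcases hre : ((i, j) :: Δ').foldl pvStep (0, i, i, j, j) with ⟨cnt, mnx, mxx, mny, mxy⟩
      have hcheck := pvCheck_eq_count i j Δ' hnd cnt mnx mxx mny mxy hre
      simp only [List.nil_append, hcheck]
      by_cases heq : cnt = (mxx - mnx + 1) * (mxy - mny + 1)
      · rw [if_pos (by simpa using heq), if_neg (by simpa using heq)]
        exact ihr v₂ vis₂ hs₂ hr₂ hrest
      · rw [if_neg (by simpa using heq), if_pos (by simpa using heq)]
    · have hcB : ¬(pvCell problem i j = 1 ∧ (i, j) ∉ vis) := by
        intro h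
        apply hc
        refine ⟨h.1, ?_⟩
        cases hgt : pvVisGet v i j
        · rfl
        · exact absurd (hcond.mp hgt) h.2
      simp only [pvLoopA, pvLoopB]
      rw [if_neg hc, if_neg hcB]
      exact ihr v vis hs hr hrest

-- ===== VERDICT (by name: the statement is the Claim_ definition above) =====
theorem is_rectangle_formed2_spec : Claim_equal_is_rectangle_formed2 := by
  unfold Claim_equal_is_rectangle_formed2
  intro problem _ _
  unfold Spec_is_rectangle_formed2
  show pvLoopA problem (problem.length : Int) ((problem.headI).length : Int)
      ((problem.length : Int).toNat * (((problem.headI).length : Int)).toNat + 1)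
      ((PySem.List.pyRange 0 (problem.length : Int) 1).flatMap fun i =>
        (PySem.List.pyRange 0 ((problem.headI).length : Int) 1).map fun j => (i, j))
      (List.replicate ((problem.length : Int)).toNat
        (List.replicate (((problem.headI).length : Int)).toNat false)) =
    pvLoopB problem (problem.length : Int) ((problem.headI).length : Int)
      ((problem.length : Int).toNat * (((problem.headI).length : Int)).toNat + 1)
      ((PySem.List.pyRange 0 (problem.length : Int) 1).flatMap fun i =>
        (PySem.List.pyRange 0 ((problem.headI).length : Int) 1).map fun j => (i, j))
      (PySem.Set.ofList [])
  apply pvLoop_lockstep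
  · exact Nat.succ_ne_zero _
  · constructor
    · simp
    · intro row hrow
      rw [List.eq_of_mem_replicate hrow]
      simp
  · intro x y hx0 hxH hy0 hyW
    constructor
    · intro hget
      exfalso
      have hxl : x.toNat < (List.replicate ((problem.length : Int)).toNat
          (List.replicate (((problem.headI).length : Int)).toNat false)).length := by
        simp; omega
      have hyl : y.toNat < ((List.replicate ((problem.length : Int)).toNat
          (List.replicate (((problem.headI).length : Int)).toNat false))[x.toNat]'hxl).length := by
        simp [List.getElem_replicate]; omega
      rw [pvVisGet_def hx0 hy0 hxl hyl] at hget
      simp [List.getElem_replicate] at hget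
    · intro h
      exact absurd h (by simp [PySem.Set.ofList])
  · intro p hp
    simp only [List.mem_flatMap, List.mem_map] at hp
    obtain ⟨a, ha, q, hq, rfl⟩ := hp
    obtain ⟨ha1, ha2⟩ := PySem.List.mem_pyRange_one.mp ha
    obtain ⟨hq1, hq2⟩ := PySem.List.mem_pyRange_one.mp hq
    exact ⟨ha1, ha2, hq1, hq2⟩
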